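-- pv_equiv track=rewrite | github.com/zVictorium/FIB-Manager | src/app/core/validator.py | calculate_schedule_dead_hours
-- ===== SOURCE A (Python) =====
-- from typing import Dict, List, Tuple, Set, Any, Iterator, FrozenSet, Optional
--
-- def count_dead_hours(slots: Dict[Tuple[int, int], List[str]]) -> int:
--     """
--     Count the number of dead hours in a schedule.
--     A dead hour is an hour without classes between two hours with classes on the same day.
--
--     Optimized version using set operations for faster computation.
--
--     Args:
--         slots: Dictionary mapping (day, hour) slots to lists of subjects
--
--     Returns:
--         Total number of dead hours across all days
--     """
--     if not slots:
--         return 0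
--
--     # Group slots by day using a dict
--     days_hours: Dict[int, List[int]] = {}
--     for (day, hour), subjects in slots.items():
--         if subjects:  # Only count hours with actual classes
--             days_hours.setdefault(day, []).append(hour)
--
--     dead_hours = 0
--     for hours in days_hours.values():
--         if len(hours) < 2:
--             continue
--         # Optimized: use min/max and set membership instead of sorting
--         hours_set = set(hours)
--         first_class = min(hours)
--         last_class = max(hours)
--         # Count gaps using range and set difference
--         expected_count = last_class - first_class + 1
--         dead_hours += expected_count - len(hours_set)
--
--     return dead_hours
--
-- def calculate_schedule_dead_hours(schedule_subjects: Dict[str, Dict[str, int]],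
--                                   group_schedule: Dict[str, Dict[str, List[Dict[str, Any]]]],
--                                   subgroup_schedule: Dict[str, Dict[str, List[Dict[str, Any]]]]) -> int:
--     """
--     Calculate the total dead hours for a specific schedule.
--
--     Args:
--         schedule_subjects: Dictionary mapping subject codes to group information
--         group_schedule: Dictionary containing parsed class data for groups
--         subgroup_schedule: Dictionary containing parsed class data for subgroups
--
--     Returns:
--         Total number of dead hours in the schedule
--     """
--     all_slots = {}
--
--     # Add group slots
--     for subject, info in schedule_subjects.items():
--         group = str(info.get("group", ""))
--         if group and subject in group_schedule and group in group_schedule[subject]: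
--             for entry in group_schedule[subject][group]:
--                 slot = (entry["day"], entry["hour"])
--                 all_slots.setdefault(slot, []).append(subject)
--
--     # Add subgroup slots
--     for subject, info in schedule_subjects.items():
--         subgroup = str(info.get("subgroup", ""))
--         if subgroup and subject in subgroup_schedule and subgroup in subgroup_schedule[subject]:
--             for entry in subgroup_schedule[subject][subgroup]:
--                 slot = (entry["day"], entry["hour"])
--                 all_slots.setdefault(slot, []).append(subject)
--
--     return count_dead_hours(all_slots)
-- ===== SOURCE B (Python) =====
-- def calculate_schedule_dead_hours(schedule_subjects, group_schedule, subgroup_schedule):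
--     # Collect the distinct occupied (day, hour) slots in one pass over the subjects,
--     # then count dead hours by a single sorted linear scan: for each pair of adjacent
--     # occupied slots on the same day, the gap between them contributes hour2-hour1-1.
--     # (No per-day grouping dict and no min/max/set-size formula: the per-day gaps
--     # telescope to the same total.)
--     occupied = set()
--     for subject, info in schedule_subjects.items():
--         group = str(info.get("group", ""))
--         if group and subject in group_schedule and group in group_schedule[subject]:
--             for entry in group_schedule[subject][group]:
--                 occupied.add((entry["day"], entry["hour"]))
--         subgroup = str(info.get("subgroup", ""))
--         if subgroup and subject in subgroup_schedule and subgroup in subgroup_schedule[subject]: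
--             for entry in subgroup_schedule[subject][subgroup]:
--                 occupied.add((entry["day"], entry["hour"]))
--     total = 0
--     prev = None
--     for day, hour in sorted(occupied):
--         if prev is not None and prev[0] == day:
--             total += hour - prev[1] - 1
--         prev = (day, hour)
--     return total
-- ===== Notes on version B (the rewrite author's own statement) =====
-- stated objective: alternative
-- what changed: B replaces A's (day,hour)->subject-list dict plus per-day min/max/set-size counting with a different algorithm: it collects the distinct occupied (day,hour) slots (same guards, one pass over the subjects), sorts them once, and sums the gaps hour2-hour1-1 between lexicographically adjacent slots of the same day in a single linear scan; the per-day gaps telescope to A's (max-min+1)-count.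
import Mathlib
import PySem

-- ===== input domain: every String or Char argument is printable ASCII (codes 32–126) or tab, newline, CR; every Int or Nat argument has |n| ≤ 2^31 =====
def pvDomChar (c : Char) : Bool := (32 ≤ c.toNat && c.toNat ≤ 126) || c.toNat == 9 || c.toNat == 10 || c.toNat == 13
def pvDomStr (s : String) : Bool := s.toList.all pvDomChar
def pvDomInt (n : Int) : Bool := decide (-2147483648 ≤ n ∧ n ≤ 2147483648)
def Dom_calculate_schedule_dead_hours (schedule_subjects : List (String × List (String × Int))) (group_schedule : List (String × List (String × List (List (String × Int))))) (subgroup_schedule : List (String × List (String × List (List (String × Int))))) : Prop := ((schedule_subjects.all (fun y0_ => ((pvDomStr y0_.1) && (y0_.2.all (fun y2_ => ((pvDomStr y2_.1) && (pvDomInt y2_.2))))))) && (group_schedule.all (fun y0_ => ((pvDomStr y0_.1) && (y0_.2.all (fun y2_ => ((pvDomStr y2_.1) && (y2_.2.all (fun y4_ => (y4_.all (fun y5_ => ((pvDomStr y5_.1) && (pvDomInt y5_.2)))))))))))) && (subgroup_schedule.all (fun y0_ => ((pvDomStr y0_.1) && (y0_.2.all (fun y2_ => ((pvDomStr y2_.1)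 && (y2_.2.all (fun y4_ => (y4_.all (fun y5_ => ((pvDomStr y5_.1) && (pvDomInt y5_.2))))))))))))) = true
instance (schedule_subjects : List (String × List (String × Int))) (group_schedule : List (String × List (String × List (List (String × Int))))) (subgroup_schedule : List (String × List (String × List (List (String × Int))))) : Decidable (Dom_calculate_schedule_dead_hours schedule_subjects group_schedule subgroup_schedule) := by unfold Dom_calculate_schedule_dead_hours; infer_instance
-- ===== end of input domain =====

-- B is a different algorithm: it collects the distinct occupied (day, hour) slots, sorts them
-- once, and sums hour gaps between adjacent same-day slots in one linear scan (the per-day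
-- gaps telescope to A's (max-min+1)-count); no per-day grouping dict and no min/max formula.

-- ===== PORT A =====
-- str(info.get(key, "")): "" when the key is absent, str(int) otherwise (used by both sources)
def pvStrGet (info : List (String × Int)) (key : String) : String :=
  match PySem.Dict.get? (PySem.Dict.mk info) key with
  | none => ""
  | some g => PySem.Int.toStr g

-- one of A's two textually identical 'for subject, info in schedule_subjects.items():' loops;
-- all_slots.setdefault(slot, []).append(subject) is Dict.modify slot [] (· ++ [subject]);
-- entry["day"] / entry["hour"] are getD _ 0: Pre_ excludes the inputs where Python raises KeyError
def pvAddSlots (sched : List (String × List (String × List (List (String × Int))))) (key : String)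
    (schedule_subjects : List (String × List (String × Int)))
    (slots0 : PySem.Dict (Int × Int) (List String)) : PySem.Dict (Int × Int) (List String) :=
  schedule_subjects.foldl (fun slots p =>
    let grp := pvStrGet p.2 key
    if grp = "" then slots
    else
      match PySem.Dict.get? (PySem.Dict.mk sched) p.1 with
      | none => slots
      | some inner =>
        match PySem.Dict.get? (PySem.Dict.mk inner) grp with
        | none => slots
        | some entries =>
          entries.foldl (fun slots e =>
            PySem.Dict.modify slots
              (PySem.Dict.getD (PySem.Dict.mk e) "day" 0, PySem.Dict.getD (PySem.Dict.mk e) "hour" 0)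
              [] (fun v => v ++ [p.1])) slots) slots0

-- count_dead_hours
def pvCountDeadHours (slots : PySem.Dict (Int × Int) (List String)) : Int :=
  if slots.items = [] then 0
  else
    let days_hours : PySem.Dict Int (List Int) :=
      slots.items.foldl (fun dh p =>
        if p.2 = [] then dh
        else PySem.Dict.modify dh p.1.1 [] (fun hs => hs ++ [p.1.2])) PySem.Dict.empty
    days_hours.values.foldl (fun dead hours =>
      if hours.length < 2 then dead
      else
        let hoursSet : PySem.Set Int := PySem.Set.ofList hours
        let firstClass := (PySem.List.min? hours (fun h => h)).getD 0
        let lastClass := (PySem.List.max? hours (fun h => h)).getD 0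
        dead + ((lastClass - firstClass + 1) - PySem.Set.len hoursSet)) 0

def calculate_schedule_dead_hours (schedule_subjects : List (String × List (String × Int))) (group_schedule : List (String × List (String × List (List (String × Int))))) (subgroup_schedule : List (String × List (String × List (List (String × Int))))) : Int :=
  let slots1 := pvAddSlots group_schedule "group" schedule_subjects PySem.Dict.empty
  let all_slots := pvAddSlots subgroup_schedule "subgroup" schedule_subjects slots1
  pvCountDeadHours all_slots

-- ===== PORT B =====
def calculate_schedule_dead_hours_alt (schedule_subjects : List (String × List (String × Int))) (group_schedule : List (String × List (String × List (List (String × Int))))) (subgroup_schedule : List (String × List (String × List (List (String × Int))))) : Int :=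
  let occupied : PySem.Set (Int × Int) :=
    schedule_subjects.foldl (fun occ p =>
      let grp := pvStrGet p.2 "group"
      let occ1 :=
        if grp = "" then occ
        else
          match PySem.Dict.get? (PySem.Dict.mk group_schedule) p.1 with
          | none => occ
          | some inner =>
            match PySem.Dict.get? (PySem.Dict.mk inner) grp with
            | none => occ
            | some entries =>
              entries.foldl (fun o e =>
                PySem.Set.add o (PySem.Dict.getD (PySem.Dict.mk e) "day" 0,
                                 PySem.Dict.getD (PySem.Dict.mk e) "hour" 0)) occ
      let sg := pvStrGet p.2 "subgroup"
      if sg = "" then occ1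
      else
        match PySem.Dict.get? (PySem.Dict.mk subgroup_schedule) p.1 with
        | none => occ1
        | some inner =>
          match PySem.Dict.get? (PySem.Dict.mk inner) sg with
          | none => occ1
          | some entries =>
            entries.foldl (fun o e =>
              PySem.Set.add o (PySem.Dict.getD (PySem.Dict.mk e) "day" 0,
                               PySem.Dict.getD (PySem.Dict.mk e) "hour" 0)) occ1)
      PySem.Set.empty
  -- sorted(occupied): tuples compare lexicographically
  let sortedSlots := PySem.List.sorted2 occupied (fun q => q.1) (fun q => q.2)
  (sortedSlots.foldl (fun st q =>
      match st.2 with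
      | none => (st.1, some q)
      | some prev => (if prev.1 = q.1 then st.1 + (q.2 - prev.2 - 1) else st.1, some q))
    ((0 : Int), (none : Option (Int × Int)))).1

-- ===== PRECONDITION & SPEC =====
-- true iff every entry A's guarded lookups reach for subject p in sched has "day" and "hour" keys
def pvEntriesOk (sched : List (String × List (String × List (List (String × Int))))) (key : String)
    (p : String × List (String × Int)) : Bool :=
  match PySem.Dict.get? (PySem.Dict.mk p.2) key with
  | none => true
  | some g =>
    match PySem.Dict.get? (PySem.Dict.mk sched) p.1 with
    | none => true
    | some inner =>
      match PySem.Dict.get? (PySem.Dict.mk inner) (PySem.Int.toStr g) with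
      | none => true
      | some entries =>
        entries.all (fun e => PySem.Dict.contains (PySem.Dict.mk e) "day" && PySem.Dict.contains (PySem.Dict.mk e) "hour")

-- Pre_ excludes exactly the inputs where Python A raises KeyError: a reached schedule entry
-- missing its "day" or "hour" key (Python B raises the same KeyError there).
def Pre_calculate_schedule_dead_hours (schedule_subjects : List (String × List (String × Int))) (group_schedule : List (String × List (String × List (List (String × Int))))) (subgroup_schedule : List (String × List (String × List (List (String × Int))))) : Prop :=
  schedule_subjects.all (fun p => pvEntriesOk group_schedule "group" p && pvEntriesOk subgroup_schedule "subgroup" p) = true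
instance (schedule_subjects : List (String × List (String × Int))) (group_schedule : List (String × List (String × List (List (String × Int))))) (subgroup_schedule : List (String × List (String × List (List (String × Int))))) : Decidable (Pre_calculate_schedule_dead_hours schedule_subjects group_schedule subgroup_schedule) := by unfold Pre_calculate_schedule_dead_hours; infer_instance

def pvWitness_calculate_schedule_dead_hours : (List (String × List (String × Int))) × (List (String × List (String × List (List (String × Int))))) × (List (String × List (String × List (List (String × Int))))) :=
  ([("A", [("group", 1)])], [("A", [("1", [[("day", 0), ("hour", 8)], [("day", 0), ("hour", 11)]])])], [])

def Spec_calculate_schedule_dead_hours (schedule_subjects : List (String × List (String × Int))) (group_schedule : List (String × List (String × List (List (String × Int))))) (subgroup_schedule : List (String × List (String × List (List (String × Int))))) (out : Int) : Prop := out = calculate_schedule_dead_hours_alt schedule_subjects group_schedule subgroup_schedule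
instance (schedule_subjects : List (String × List (String × Int))) (group_schedule : List (String × List (String × List (List (String × Int))))) (subgroup_schedule : List (String × List (String × List (List (String × Int))))) (out : Int) : Decidable (Spec_calculate_schedule_dead_hours schedule_subjects group_schedule subgroup_schedule out) := by unfold Spec_calculate_schedule_dead_hours; infer_instance

-- ===== CLAIM (what is proved, stated in full; the proofs are below) =====
def Claim_equal_calculate_schedule_dead_hours : Prop := ∀ (schedule_subjects : List (String × List (String × Int))) (group_schedule : List (String × List (String × List (List (String × Int))))) (subgroup_schedule : List (String × List (String × List (List (String × Int))))), Dom_calculate_schedule_dead_hours schedule_subjects group_schedule subgroup_schedule → Pre_calculate_schedule_dead_hours schedule_subjects group_schedule subgroup_schedule → Spec_calculate_schedule_dead_hours schedule_subjects group_schedule subgroup_schedule (calculate_schedule_dead_hours schedule_subjects group_schedule subgroup_schedule)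

-- ===== LEMMAS AND PROOFS =====

-- the (day, hour) pairs A's (and B's) guarded lookups produce for one subject p
def pvEv (sched : List (String × List (String × List (List (String × Int))))) (key : String)
    (p : String × List (String × Int)) : List (Int × Int) :=
  match PySem.Dict.get? (PySem.Dict.mk p.2) key with
  | none => []
  | some g =>
    match PySem.Dict.get? (PySem.Dict.mk sched) p.1 with
    | none => []
    | some inner =>
      match PySem.Dict.get? (PySem.Dict.mk inner) (PySem.Int.toStr g) with
      | none => []
      | some entries =>
        entries.map (fun e => (PySem.Dict.getD (PySem.Dict.mk e) "day" 0, PySem.Dict.getD (PySem.Dict.mk e) "hour" 0))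

-- Python's lexicographic tuple order on (day, hour)
def pvLexLt (p q : Int × Int) : Prop := p.1 < q.1 ∨ (p.1 = q.1 ∧ p.2 < q.2)

-- sum of adjacent same-day gaps, as B's scan computes it after its first element
def pvAdjAux : (Int × Int) → List (Int × Int) → Int
  | _, [] => 0
  | p, q :: t => (if p.1 = q.1 then q.2 - p.2 - 1 else 0) + pvAdjAux q t

-- the distinct day values of a lex-sorted slot list, in order (one per block)
def pvDays : List (Int × Int) → List Int
  | [] => []
  | [p] => [p.1]
  | p :: q :: t => if p.1 = q.1 then pvDays (q :: t) else p.1 :: pvDays (q :: t)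

def pvHours (d : Int) (T : List (Int × Int)) : List Int :=
  (T.filter (fun q => q.1 == d)).map (fun q => q.2)

-- A's per-day dead-hour count, on a duplicate-free hour list
def pvVal (hs : List Int) : Int :=
  if hs.length < 2 then 0
  else ((PySem.List.max? hs (fun h => h)).getD 0 - (PySem.List.min? hs (fun h => h)).getD 0 + 1 - hs.length)

theorem pv_toStr_ne_empty (n : Int) : PySem.Int.toStr n ≠ "" := by
  intro h
  have h2 : (PySem.Int.toStr n).toList = [] := by rw [h]; rfl
  rw [PySem.Int.toList_toStr] at h2
  unfold PySem.Int.toChars at h2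
  split at h2
  · simp at h2
  · have h3 : 0 < (Nat.toDigits 10 n.toNat).length := Nat.length_toDigits_pos
    rw [h2] at h3; simp at h3

-- A's pass is a fold of the slot-dict step over the flattened event stream
theorem pv_addSlots_eq (sched : List (String × List (String × List (List (String × Int))))) (key : String)
    (ss : List (String × List (String × Int))) (s0 : PySem.Dict (Int × Int) (List String)) :
    pvAddSlots sched key ss s0 =
      (ss.flatMap (fun p => (pvEv sched key p).map (fun q => (q, p.1)))).foldl
        (fun d ev => PySem.Dict.modify d ev.1 [] (fun v => v ++ [ev.2])) s0 := by
  rw [List.foldl_flatMap]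
  unfold pvAddSlots
  apply PySem.List.foldl_congr_mem
  intro acc p _
  simp only [List.foldl_map]
  unfold pvEv pvStrGet
  cases hg : PySem.Dict.get? (PySem.Dict.mk p.2) key with
  | none => simp
  | some g =>
    simp only
    rw [if_neg (pv_toStr_ne_empty g)]
    cases hi : PySem.Dict.get? (PySem.Dict.mk sched) p.1 with
    | none => simp
    | some inner =>
      cases he : PySem.Dict.get? (PySem.Dict.mk inner) (PySem.Int.toStr g) with
      | none => simp [he]
      | some entries => simp [he, List.foldl_map]

-- B's slot-collecting pass is Set.ofList of the same events, interleaved per subject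
theorem pv_occ_eq (gs sgs : List (String × List (String × List (List (String × Int))))) (ss : List (String × List (String × Int))) :
    ss.foldl (fun occ p =>
      let grp := pvStrGet p.2 "group"
      let occ1 :=
        if grp = "" then occ
        else
          match PySem.Dict.get? (PySem.Dict.mk gs) p.1 with
          | none => occ
          | some inner =>
            match PySem.Dict.get? (PySem.Dict.mk inner) grp with
            | none => occ
            | some entries =>
              entries.foldl (fun o e =>
                PySem.Set.add o (PySem.Dict.getD (PySem.Dict.mk e) "day" 0,
                                 PySem.Dict.getD (PySem.Dict.mk e) "hour" 0)) occ
      let sg := pvStrGet p.2 "subgroup"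
      if sg = "" then occ1
      else
        match PySem.Dict.get? (PySem.Dict.mk sgs) p.1 with
        | none => occ1
        | some inner =>
          match PySem.Dict.get? (PySem.Dict.mk inner) sg with
          | none => occ1
          | some entries =>
            entries.foldl (fun o e =>
              PySem.Set.add o (PySem.Dict.getD (PySem.Dict.mk e) "day" 0,
                               PySem.Dict.getD (PySem.Dict.mk e) "hour" 0)) occ1) PySem.Set.empty =
    PySem.Set.ofList (ss.flatMap (fun p => pvEv gs "group" p ++ pvEv sgs "subgroup" p)) := by
  rw [PySem.Set.ofList_eq_foldl, List.foldl_flatMap]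
  apply PySem.List.foldl_congr_mem
  intro acc p _
  rw [List.foldl_append]
  have hhalf : ∀ (sched : List (String × List (String × List (List (String × Int))))) (key : String) (o : PySem.Set (Int × Int)),
      (if pvStrGet p.2 key = "" then o
       else
        match PySem.Dict.get? (PySem.Dict.mk sched) p.1 with
        | none => o
        | some inner =>
          match PySem.Dict.get? (PySem.Dict.mk inner) (pvStrGet p.2 key) with
          | none => o
          | some entries =>
            entries.foldl (fun o e =>
              PySem.Set.add o (PySem.Dict.getD (PySem.Dict.mk e) "day" 0,
                               PySem.Dict.getD (PySem.Dict.mk e) "hour" 0)) o) =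
      (pvEv sched key p).foldl PySem.Set.add o := by
    intro sched key o
    unfold pvEv pvStrGet
    cases hg : PySem.Dict.get? (PySem.Dict.mk p.2) key with
    | none => simp
    | some g =>
      simp only
      rw [if_neg (pv_toStr_ne_empty g)]
      cases hi : PySem.Dict.get? (PySem.Dict.mk sched) p.1 with
      | none => simp
      | some inner =>
        cases he : PySem.Dict.get? (PySem.Dict.mk inner) (PySem.Int.toStr g) with
        | none => simp [he]
        | some entries => simp [he, List.foldl_map]
  rw [← hhalf gs "group" acc, ← hhalf sgs "subgroup" _]

-- B's scan is the adjacency sum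
theorem pv_scan_aux (t : List (Int × Int)) : ∀ (p : Int × Int) (acc : Int),
    (t.foldl (fun st q =>
      match st.2 with
      | none => (st.1, some q)
      | some prev => (if prev.1 = q.1 then st.1 + (q.2 - prev.2 - 1) else st.1, some q))
      (acc, some p)).1 = acc + pvAdjAux p t := by
  induction t with
  | nil => intro p acc; simp [pvAdjAux]
  | cons q t ih =>
    intro p acc
    simp only [List.foldl_cons, pvAdjAux]
    split_ifs with h
    · rw [ih q]; ring
    · rw [ih q]; ring

theorem pv_scan (T : List (Int × Int)) :
    (T.foldl (fun st q =>
      match st.2 with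
      | none => (st.1, some q)
      | some prev => (if prev.1 = q.1 then st.1 + (q.2 - prev.2 - 1) else st.1, some q))
      ((0 : Int), (none : Option (Int × Int)))).1 =
    (match T with | [] => 0 | p :: t => pvAdjAux p t) := by
  cases T with
  | nil => rfl
  | cons p t =>
    simp only [List.foldl_cons]
    rw [pv_scan_aux t p 0]
    simp

-- foldl of a guarded accumulation is a sum
theorem pv_foldl_if_sum {α : Type} (P : α → Prop) [DecidablePred P] (g : α → Int) :
    ∀ (l : List α) (a : Int),
    l.foldl (fun acc x => if P x then acc else acc + g x) a =
      a + (l.map (fun x => if P x then 0 else g x)).sum := by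
  intro l
  induction l with
  | nil => simp
  | cons x t ih =>
    intro a
    simp only [List.foldl_cons, List.map_cons, List.sum_cons]
    split_ifs with h
    · rw [ih]; ring
    · rw [ih]; ring

-- sums over a nodup index list that differ at exactly one index
theorem pv_sum_update (F G : Int → Int) (d0 δ : Int) :
    ∀ (ds : List Int), ds.Nodup → d0 ∈ ds → (∀ d ∈ ds, d ≠ d0 → F d = G d) → F d0 = G d0 + δ →
    (ds.map F).sum = (ds.map G).sum + δ := by
  intro ds
  induction ds with
  | nil => intro _ h; exact absurd h (List.not_mem_nil)
  | cons d t ih =>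
    intro hnd hmem hagree hdelta
    simp only [List.map_cons, List.sum_cons]
    rcases List.mem_cons.mp hmem with h0 | h0
    · subst h0
      have : ∀ e ∈ t, F e = G e := fun e he =>
        hagree e (List.mem_cons_of_mem _ he) (fun habs => (List.nodup_cons.mp hnd).1 (habs ▸ he))
      rw [hdelta, List.map_congr_left this]; ring
    · have hd : F d = G d := hagree d List.mem_cons_self (fun habs => (List.nodup_cons.mp hnd).1 (habs ▸ h0))
      rw [hd, ih (List.nodup_cons.mp hnd).2 h0 (fun e he hne => hagree e (List.mem_cons_of_mem _ he) hne) hdelta]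
      ring

theorem pv_ofList_append_singleton {α : Type} [BEq α] (l : List α) (x : α) :
    PySem.Set.ofList (l ++ [x]) = PySem.Set.add (PySem.Set.ofList l) x := by
  simp [PySem.Set.ofList_eq_foldl, List.foldl_append]

theorem pv_ofList_map_ofList {α β : Type} [BEq α] [LawfulBEq α] [BEq β] [LawfulBEq β]
    (f : α → β) (l : List α) :
    PySem.Set.ofList ((PySem.Set.ofList l).map f) = PySem.Set.ofList (l.map f) := by
  induction l using List.reverseRecOn with
  | nil => rfl
  | append_singleton l x ih =>
    rw [pv_ofList_append_singleton, List.map_append, List.map_singleton,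
      pv_ofList_append_singleton]
    by_cases hx : x ∈ PySem.Set.ofList l
    · rw [PySem.Set.add_of_mem hx, ih, PySem.Set.add_of_mem]
      rw [PySem.Set.mem_ofList] at hx ⊢
      exact List.mem_map_of_mem hx
    · rw [PySem.Set.add_of_not_mem hx, List.map_append, List.map_singleton,
        pv_ofList_append_singleton, ih]

theorem pv_filter_ofList {α : Type} [BEq α] [LawfulBEq α] (p : α → Bool) (l : List α) :
    (PySem.Set.ofList l).filter p = PySem.Set.ofList (l.filter p) := by
  induction l using List.reverseRecOn with
  | nil => rfl
  | append_singleton l x ih =>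
    rw [pv_ofList_append_singleton, List.filter_append]
    by_cases hx : x ∈ PySem.Set.ofList l
    · rw [PySem.Set.add_of_mem hx]
      by_cases hp : p x
      · simp only [List.filter_singleton, hp, cond_true]
        rw [ih, pv_ofList_append_singleton, PySem.Set.add_of_mem]
        rw [PySem.Set.mem_ofList] at hx ⊢
        exact List.mem_filter.mpr ⟨hx, hp⟩
      · simp only [List.filter_singleton, hp, cond_false, List.append_nil]
        exact ih
    · rw [PySem.Set.add_of_not_mem hx, List.filter_append]
      by_cases hp : p x
      · simp only [List.filter_singleton, hp, cond_true]
        rw [ih, pv_ofList_append_singleton, PySem.Set.add_of_not_mem]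
        rw [PySem.Set.mem_ofList] at hx ⊢
        intro hmem; exact hx (List.mem_of_mem_filter hmem)
      · simp only [List.filter_singleton, hp, cond_false, List.append_nil]
        exact ih

theorem pv_mapSnd_ofList {α β : Type} [BEq α] [LawfulBEq α] [BEq β] [LawfulBEq β] (c : α)
    (M : List (α × β)) (h : ∀ y ∈ M, y.1 = c) :
    (PySem.Set.ofList M).map (fun y => y.2) = PySem.Set.ofList (M.map (fun y => y.2)) := by
  induction M using List.reverseRecOn with
  | nil => rfl
  | append_singleton M x ih =>
    have hM : ∀ y ∈ M, y.1 = c := fun y hy => h y (List.mem_append_left _ hy)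
    have hx1 : x.1 = c := h x (List.mem_append_right _ (List.mem_singleton_self x))
    rw [pv_ofList_append_singleton, List.map_append, List.map_singleton,
      pv_ofList_append_singleton]
    by_cases hx : x ∈ PySem.Set.ofList M
    · rw [PySem.Set.add_of_mem hx, ih hM, PySem.Set.add_of_mem]
      rw [PySem.Set.mem_ofList] at hx ⊢
      exact List.mem_map_of_mem hx
    · rw [PySem.Set.add_of_not_mem hx, List.map_append, List.map_singleton, ih hM]
      refine (PySem.Set.add_of_not_mem ?_).symm
      rw [PySem.Set.mem_ofList] at hx ⊢
      intro hmem
      obtain ⟨y, hy, hyx⟩ := List.mem_map.mp hmem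
      apply hx
      have : y = x := Prod.ext ((hM y hy).trans hx1.symm) hyx
      rwa [this] at hy

-- A's result as a sum over the distinct days of the per-day dead-hour counts
theorem pv_A_char (ev : List ((Int × Int) × String)) :
    pvCountDeadHours (ev.foldl (fun d e => PySem.Dict.modify d e.1 [] (fun v => v ++ [e.2])) PySem.Dict.empty) =
      ((PySem.Set.ofList ((ev.map (fun e => e.1)).map (fun q => q.1))).map
        (fun c => pvVal (((PySem.Set.ofList (ev.map (fun e => e.1))).filter (fun q => q.1 == c)).map (fun q => q.2)))).sum := by
  set L : List (Int × Int) := ev.map (fun e => e.1) with hL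
  set slots := ev.foldl (fun d e => PySem.Dict.modify d e.1 [] (fun v => v ++ [e.2])) PySem.Dict.empty with hslots
  have hK : slots.keys = PySem.Set.ofList L := by
    have h1 : slots.keys = PySem.Set.update PySem.Dict.empty.keys (ev.map (fun e => e.1)) :=
      PySem.Dict.keys_foldl_modify_key ev (fun e => e.1) [] (fun _ e v => v ++ [e.2]) PySem.Dict.empty
    rw [PySem.Dict.keys_empty] at h1
    rw [h1, PySem.Set.ofList_eq_foldl]
    rfl
  have hNod : slots.keys.Nodup := by
    rw [hK]; exact PySem.Set.nodup_ofList L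
  have hVal : ∀ c, slots.getD c [] = (ev.filter (fun e => e.1 == c)).map (fun e => e.2) := by
    intro c
    rw [hslots]
    have h1 := PySem.Dict.getD_foldl_modify_append ev PySem.Dict.empty c
    rw [h1, PySem.Dict.getD_empty, List.nil_append]
  by_cases hnil : slots.items = []
  · have hks : slots.keys = [] := by simp [PySem.Dict.keys, hnil]
    have hofl : PySem.Set.ofList L = [] := by rw [← hK, hks]
    have hLnil : L = [] := by
      cases hcase : L with
      | nil => rfl
      | cons x t =>
        exfalso
        have : x ∈ PySem.Set.ofList L := (PySem.Set.mem_ofList L x).mpr (by rw [hcase]; exact List.mem_cons_self)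
        rw [hofl] at this
        exact absurd this (List.not_mem_nil)
    have hev : ev = [] := List.map_eq_nil_iff.mp (hL ▸ hLnil)
    subst hev
    rfl
  · unfold pvCountDeadHours
    rw [if_neg hnil]
    dsimp only
    have hNE : ∀ pr ∈ slots.items, ¬(pr.2 = []) := by
      intro pr hpr
      have hget : slots.getD pr.1 [] = pr.2 := by
        obtain ⟨k, v⟩ := pr
        exact PySem.Dict.getD_of_mem_items slots hpr hNod []
      have hmemk : pr.1 ∈ slots.keys := PySem.Dict.mem_keys_of_mem_items slots hpr
      rw [hK, PySem.Set.mem_ofList] at hmemk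
      obtain ⟨e, he, hek⟩ := List.mem_map.mp hmemk
      rw [hVal pr.1] at hget
      intro habs
      rw [habs] at hget
      have : e ∈ ev.filter (fun e => e.1 == pr.1) := List.mem_filter.mpr ⟨he, by simp [hek]⟩
      have : (e.2 : String) ∈ (ev.filter (fun e => e.1 == pr.1)).map (fun e => e.2) := List.mem_map_of_mem this
      rw [hget] at this
      exact absurd this (List.not_mem_nil)
    have hdrop : slots.items.foldl (fun dh p => if p.2 = [] then dh else PySem.Dict.modify dh p.1.1 [] (fun hs => hs ++ [p.1.2])) PySem.Dict.empty
        = (PySem.Set.ofList L).foldl (fun dh q => PySem.Dict.modify dh q.1 [] (fun hs => hs ++ [q.2])) PySem.Dict.empty := by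
      rw [PySem.List.foldl_congr_mem slots.items _ (fun dh p => PySem.Dict.modify dh p.1.1 [] (fun hs => hs ++ [p.1.2])) PySem.Dict.empty (fun acc x hx => by rw [if_neg (hNE x hx)])]
      rw [← hK]
      rw [show slots.keys = slots.items.map (fun p => p.1) from rfl, List.foldl_map]
    rw [hdrop]
    set dhA := (PySem.Set.ofList L).foldl (fun dh q => PySem.Dict.modify dh q.1 [] (fun hs => hs ++ [q.2])) PySem.Dict.empty with hdhA
    have hKA : dhA.keys = PySem.Set.ofList (L.map (fun q => q.1)) := by
      have h1 : dhA.keys = PySem.Set.update PySem.Dict.empty.keys ((PySem.Set.ofList L).map (fun q => q.1)) :=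
        PySem.Dict.keys_foldl_modify_key (PySem.Set.ofList L) (fun q => q.1) []
          (fun _ q hs => hs ++ [q.2]) PySem.Dict.empty
    -- keys are the distinct days
      rw [PySem.Dict.keys_empty] at h1
      rw [h1, show PySem.Set.update ([] : PySem.Set Int) ((PySem.Set.ofList L).map (fun q => q.1)) = PySem.Set.ofList ((PySem.Set.ofList L).map (fun q => q.1)) from by rw [PySem.Set.ofList_eq_foldl]; rfl]
      exact pv_ofList_map_ofList (fun q => q.1) L
    have hNodA : dhA.keys.Nodup := by rw [hKA]; exact PySem.Set.nodup_ofList _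
    rw [PySem.Dict.values_eq_map_keys dhA hNodA [], List.foldl_map]
    rw [pv_foldl_if_sum (fun c => (dhA.getD c []).length < 2)
      (fun c => ((PySem.List.max? (dhA.getD c []) (fun h => h)).getD 0 - (PySem.List.min? (dhA.getD c []) (fun h => h)).getD 0 + 1) - PySem.Set.len (PySem.Set.ofList (dhA.getD c []))) dhA.keys 0]
    rw [hKA, zero_add]
    apply congrArg
    apply List.map_congr_left
    intro c _
    have hA : dhA.getD c [] = ((PySem.Set.ofList L).filter (fun q => q.1 == c)).map (fun q => q.2) := by
      rw [hdhA]
      have h1 := PySem.Dict.getD_foldl_modify_append (PySem.Set.ofList L) (PySem.Dict.empty : PySem.Dict Int (List Int)) c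
      rw [h1, PySem.Dict.getD_empty, List.nil_append]
    have hfeq : ((PySem.Set.ofList L).filter (fun q => q.1 == c)).map (fun q => q.2)
        = PySem.Set.ofList ((L.filter (fun q => q.1 == c)).map (fun q => q.2)) := by
      rw [pv_filter_ofList]
      exact pv_mapSnd_ofList c _ (fun y hy => by
        have := (List.mem_filter.mp hy).2
        exact eq_of_beq this)
    have hnd : (dhA.getD c []).Nodup := by rw [hA, hfeq]; exact PySem.Set.nodup_ofList _
    rw [← hA]
    unfold pvVal
    rw [PySem.Set.ofList_eq_self_of_nodup _ hnd]
    simp only [PySem.Set.len]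

-- ===== the sorted-scan side =====

theorem pv_days_head_mem : ∀ (t : List (Int × Int)) (p : Int × Int), p.1 ∈ pvDays (p :: t) := by
  intro t
  induction t with
  | nil => intro p; simp [pvDays]
  | cons q t ih =>
    intro p
    by_cases h : p.1 = q.1
    · simp only [pvDays, if_pos h]
      rw [h]; exact ih q
    · simp [pvDays, if_neg h]

theorem pv_mem_days : ∀ (T : List (Int × Int)) (d : Int), d ∈ pvDays T ↔ ∃ q ∈ T, q.1 = d := by
  intro T
  induction T with
  | nil => intro d; simp [pvDays]
  | cons p t ih =>
    intro d
    cases t with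
    | nil => simp [pvDays, eq_comm]
    | cons q t' =>
      by_cases h : p.1 = q.1
      · rw [show pvDays (p :: q :: t') = pvDays (q :: t') from by simp [pvDays, if_pos h]]
        rw [ih d]
        constructor
        · rintro ⟨x, hx, hxd⟩; exact ⟨x, List.mem_cons_of_mem _ hx, hxd⟩
        · rintro ⟨x, hx, hxd⟩
          rcases List.mem_cons.mp hx with h0 | h0
          · refine ⟨q, List.mem_cons_self, ?_⟩
            rw [← h, ← h0]; exact hxd
          · exact ⟨x, h0, hxd⟩
      · rw [show pvDays (p :: q :: t') = p.1 :: pvDays (q :: t') from by simp [pvDays, if_neg h]]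
        constructor
        · intro hmem
          rcases List.mem_cons.mp hmem with h0 | h0
          · exact ⟨p, List.mem_cons_self, h0.symm⟩
          · obtain ⟨x, hx, hxd⟩ := (ih d).mp h0
            exact ⟨x, List.mem_cons_of_mem _ hx, hxd⟩
        · rintro ⟨x, hx, hxd⟩
          rcases List.mem_cons.mp hx with h0 | h0
          · exact List.mem_cons.mpr (Or.inl (by rw [h0] at hxd; exact hxd.symm))
          · exact List.mem_cons_of_mem _ ((ih d).mpr ⟨x, h0, hxd⟩)

theorem pv_fst_lt (p q : Int × Int) (t' : List (Int × Int))
    (hp : ∀ x ∈ q :: t', pvLexLt p x) (hq : (q :: t').Pairwise pvLexLt) (hne : p.1 ≠ q.1) :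
    ∀ x ∈ q :: t', p.1 < x.1 := by
  have hpq : p.1 < q.1 := by
    rcases hp q List.mem_cons_self with h | ⟨h, _⟩
    · exact h
    · exact absurd h hne
  intro x hx
  rcases List.mem_cons.mp hx with h0 | h0
  · rw [h0]; exact hpq
  · have := (List.pairwise_cons.mp hq).1 x h0
    rcases this with h | ⟨h, _⟩
    · omega
    · omega

theorem pv_days_nodup : ∀ (T : List (Int × Int)), T.Pairwise pvLexLt → (pvDays T).Nodup := by
  intro T
  induction T with
  | nil => intro _; simp [pvDays]
  | cons p t ih =>
    intro hpw
    have hrest := (List.pairwise_cons.mp hpw).2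
    cases t with
    | nil => simp [pvDays]
    | cons q t' =>
      by_cases h : p.1 = q.1
      · rw [show pvDays (p :: q :: t') = pvDays (q :: t') from by simp [pvDays, if_pos h]]
        exact ih hrest
      · rw [show pvDays (p :: q :: t') = p.1 :: pvDays (q :: t') from by simp [pvDays, if_neg h]]
        refine List.nodup_cons.mpr ⟨?_, ih hrest⟩
        intro hmem
        obtain ⟨x, hx, hxd⟩ := (pv_mem_days _ _).mp hmem
        have := pv_fst_lt p q t' (List.pairwise_cons.mp hpw).1 hrest h x hx
        omega

theorem pv_hours_pairwise (d : Int) (T : List (Int × Int)) (h : T.Pairwise pvLexLt) :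
    (pvHours d T).Pairwise (· < ·) := by
  unfold pvHours
  rw [List.pairwise_map]
  have hf : (T.filter (fun q => q.1 == d)).Pairwise pvLexLt := h.filter _
  refine hf.imp_of_mem ?_
  intro a b ha hb hab
  have ha1 : a.1 = d := by simpa using (List.mem_filter.mp ha).2
  have hb1 : b.1 = d := by simpa using (List.mem_filter.mp hb).2
  rcases hab with h1 | ⟨_, h2⟩
  · omega
  · exact h2

theorem pv_min_head (h : Int) (hs : List Int) (hpw : (h :: hs).Pairwise (· < ·)) :
    (PySem.List.min? (h :: hs) (fun x => x)).getD 0 = h := by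
  cases hm : PySem.List.min? (h :: hs) (fun x => x) with
  | none => exact absurd ((PySem.List.min?_eq_none_iff _ _).mp hm) (by simp)
  | some m =>
    have hmem : m ∈ h :: hs := PySem.List.min?_mem hm
    have h1 : m ≤ h := PySem.List.min?_isMin hm h List.mem_cons_self
    have h2 : h ≤ m := by
      rcases List.mem_cons.mp hmem with h0 | h0
      · omega
      · have := (List.pairwise_cons.mp hpw).1 m h0; omega
    simp; omega

theorem pv_max_getD_mem_isMax (hs : List Int) (hne : hs ≠ []) :
    (PySem.List.max? hs (fun x => x)).getD 0 ∈ hs ∧ ∀ y ∈ hs, y ≤ (PySem.List.max? hs (fun x => x)).getD 0 := by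
  cases hm : PySem.List.max? hs (fun x => x) with
  | none => exact absurd ((PySem.List.max?_eq_none_iff _ _).mp hm) hne
  | some m =>
    exact ⟨by simpa using PySem.List.max?_mem hm, fun y hy => by simpa using PySem.List.max?_isMax hm y hy⟩

theorem pv_max_tail (x y : Int) (hs : List Int) (hpw : (x :: y :: hs).Pairwise (· < ·)) :
    (PySem.List.max? (x :: y :: hs) (fun h => h)).getD 0 = (PySem.List.max? (y :: hs) (fun h => h)).getD 0 := by
  obtain ⟨hmem1, hmax1⟩ := pv_max_getD_mem_isMax (x :: y :: hs) (by simp)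
  obtain ⟨hmem2, hmax2⟩ := pv_max_getD_mem_isMax (y :: hs) (by simp)
  set m1 := (PySem.List.max? (x :: y :: hs) (fun h => h)).getD 0
  set m2 := (PySem.List.max? (y :: hs) (fun h => h)).getD 0
  have hxy : x < y := (List.pairwise_cons.mp hpw).1 y List.mem_cons_self
  have hm1mem : m1 ∈ y :: hs := by
    rcases List.mem_cons.mp hmem1 with h0 | h0
    · exfalso
      have := hmax1 y (List.mem_cons_of_mem _ List.mem_cons_self)
      omega
    · exact h0
  have h1 : m1 ≤ m2 := hmax2 m1 hm1mem
  have h2 : m2 ≤ m1 := hmax1 m2 (List.mem_cons_of_mem _ hmem2)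
  omega

theorem pv_val_cons (x y : Int) (hs : List Int) (hpw : (x :: y :: hs).Pairwise (· < ·)) :
    pvVal (x :: y :: hs) = pvVal (y :: hs) + (y - x - 1) := by
  have hmin1 := pv_min_head x (y :: hs) hpw
  have hmax := pv_max_tail x y hs hpw
  have hrest := (List.pairwise_cons.mp hpw).2
  have hmin2 := pv_min_head y hs hrest
  cases hs with
  | nil =>
    unfold pvVal
    simp only [List.length_cons, List.length_nil] at *
    rw [if_neg (by omega), if_pos (by omega)]
    rw [hmin1, hmax]
    have : (PySem.List.max? [y] (fun h => h)).getD 0 = y := by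
      obtain ⟨hm, _⟩ := pv_max_getD_mem_isMax [y] (by simp)
      simpa using hm
    rw [this]; ring
  | cons z hs' =>
    unfold pvVal
    simp only [List.length_cons] at *
    rw [if_neg (by omega), if_neg (by omega)]
    rw [hmin1, hmax, hmin2]
    push_cast
    ring

-- the heart: on a lex-sorted slot list the adjacency sum is A's per-day dead-hour sum
theorem pv_aux : ∀ (T : List (Int × Int)), T.Pairwise pvLexLt →
    (match T with | [] => 0 | p :: t => pvAdjAux p t) =
      ((pvDays T).map (fun d => pvVal (pvHours d T))).sum := by
  intro T
  induction T with
  | nil => intro _; simp [pvDays]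
  | cons p t ih =>
    intro hpw
    obtain ⟨hp, hrest⟩ := List.pairwise_cons.mp hpw
    cases t with
    | nil =>
      simp only [pvDays, pvAdjAux, pvHours, List.filter_cons, List.filter_nil]
      simp [pvVal]
    | cons q t' =>
      have ihv : pvAdjAux q t' = ((pvDays (q :: t')).map (fun d => pvVal (pvHours d (q :: t')))).sum := ih hrest
      by_cases h : p.1 = q.1
      · rw [show pvDays (p :: q :: t') = pvDays (q :: t') from by simp [pvDays, if_pos h]]
        show pvAdjAux p (q :: t') = _
        rw [show pvAdjAux p (q :: t') = (q.2 - p.2 - 1) + pvAdjAux q t' from by simp [pvAdjAux, if_pos h]]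
        rw [ihv]
        have hagree : ∀ d ∈ pvDays (q :: t'), d ≠ p.1 →
            (fun d => pvVal (pvHours d (p :: q :: t'))) d = (fun d => pvVal (pvHours d (q :: t'))) d := by
          intro d _ hne
          have hdp : (p.1 == d) = false := by simp; omega
          simp [pvHours, List.filter_cons, hdp]
        have hdelta : (fun d => pvVal (pvHours d (p :: q :: t'))) p.1 =
            (fun d => pvVal (pvHours d (q :: t'))) p.1 + (q.2 - p.2 - 1) := by
          have hq1 : (q.1 == p.1) = true := by simp [← h]
          have h1 : pvHours p.1 (p :: q :: t') = p.2 :: q.2 :: pvHours p.1 t' := by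
            simp [pvHours, hq1]
          have h2 : pvHours p.1 (q :: t') = q.2 :: pvHours p.1 t' := by
            simp [pvHours, hq1]
          have hpwh := pv_hours_pairwise p.1 (p :: q :: t') hpw
          rw [h1] at hpwh
          simp only [h1, h2]
          exact pv_val_cons p.2 q.2 (pvHours p.1 t') hpwh
        rw [pv_sum_update (fun d => pvVal (pvHours d (p :: q :: t'))) (fun d => pvVal (pvHours d (q :: t'))) p.1 (q.2 - p.2 - 1)
          (pvDays (q :: t')) (pv_days_nodup _ hrest) (h ▸ pv_days_head_mem t' q) hagree hdelta]
        ring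
      · rw [show pvDays (p :: q :: t') = p.1 :: pvDays (q :: t') from by simp [pvDays, if_neg h]]
        show pvAdjAux p (q :: t') = _
        rw [show pvAdjAux p (q :: t') = pvAdjAux q t' from by simp [pvAdjAux, if_neg h]]
        rw [ihv]
        have hlt := pv_fst_lt p q t' hp hrest h
        have hne : ∀ x ∈ q :: t', ¬ (x.1 == p.1) = true := by
          intro x hx; have := hlt x hx; simp; omega
        have hfilter0 : (q :: t').filter (fun x => x.1 == p.1) = [] :=
          List.filter_eq_nil_iff.mpr hne
        simp only [List.map_cons, List.sum_cons]
        have hterm : pvVal (pvHours p.1 (p :: q :: t')) = 0 := by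
          have hhours : pvHours p.1 (p :: q :: t') = [p.2] := by
            simp [pvHours, hfilter0]
          rw [hhours]
          simp [pvVal]
        have hsame : ∀ d ∈ pvDays (q :: t'), pvVal (pvHours d (p :: q :: t')) = pvVal (pvHours d (q :: t')) := by
          intro d hd
          obtain ⟨x, hx, hxd⟩ := (pv_mem_days _ _).mp hd
          have hdp : (p.1 == d) = false := by
            have := hlt x hx; simp; omega
          simp [pvHours, List.filter_cons, hdp]
        rw [hterm, List.map_congr_left hsame]
        ring

-- sorted2 with fst/snd keys is sorting by the lexicographic order on pairs
theorem pv_sorted2_eq (xs : List (Int × Int)) :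
    PySem.List.sorted2 xs (fun q => q.1) (fun q => q.2) =
    PySem.List.sorted xs (fun q => toLex q) := by
  unfold PySem.List.sorted2 PySem.List.sorted
  simp only []
  congr 1
  funext acc x
  congr 1
  funext a b
  rcases a with ⟨a1, a2⟩; rcases b with ⟨b1, b2⟩
  simp only [Prod.Lex.toLex_lt_toLex]
  by_cases h1 : a1 < b1 <;> by_cases h2 : b1 < a1 <;> by_cases h3 : a2 < b2 <;>
    simp [h1, h2, h3] <;> omega

theorem pv_T_pairwise (S : List (Int × Int)) (hnd : S.Nodup) :
    (PySem.List.sorted2 S (fun q => q.1) (fun q => q.2)).Pairwise pvLexLt := by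
  rw [pv_sorted2_eq]
  have hle := PySem.List.sorted_pairwise S (fun q => toLex q)
  have hndT : (PySem.List.sorted S (fun q => toLex q)).Nodup :=
    (PySem.List.sorted_perm S (fun q => toLex q) false).nodup_iff.mpr hnd
  have hcomb := hle.and hndT
  refine hcomb.imp ?_
  rintro a b ⟨h1, h2⟩
  have hlt : toLex a < toLex b := lt_of_le_of_ne h1 (fun habs => h2 (toLex.injective habs))
  exact Prod.Lex.toLex_lt_toLex.mp hlt

-- pvVal depends only on the underlying finite set of hours
theorem pv_minD_congr (l l' : List Int) (hmem : ∀ a, a ∈ l ↔ a ∈ l') :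
    (PySem.List.min? l (fun x => x)).getD 0 = (PySem.List.min? l' (fun x => x)).getD 0 := by
  cases hm : PySem.List.min? l (fun x => x) with
  | none =>
    have hl : l = [] := (PySem.List.min?_eq_none_iff _ _).mp hm
    have hl' : l' = [] := by
      cases hc : l' with
      | nil => rfl
      | cons x t => exact absurd ((hmem x).mpr (by rw [hc]; exact List.mem_cons_self)) (by rw [hl]; simp)
    rw [hl']
    rfl
  | some m =>
    cases hm' : PySem.List.min? l' (fun x => x) with
    | none =>
      have hl' : l' = [] := (PySem.List.min?_eq_none_iff _ _).mp hm'
      exact absurd ((hmem m).mp (PySem.List.min?_mem hm)) (by rw [hl']; simp)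
    | some m' =>
      have h1 : m ≤ m' := PySem.List.min?_isMin hm m' ((hmem m').mpr (PySem.List.min?_mem hm'))
      have h2 : m' ≤ m := PySem.List.min?_isMin hm' m ((hmem m).mp (PySem.List.min?_mem hm))
      simp; omega

theorem pv_maxD_congr (l l' : List Int) (hmem : ∀ a, a ∈ l ↔ a ∈ l') :
    (PySem.List.max? l (fun x => x)).getD 0 = (PySem.List.max? l' (fun x => x)).getD 0 := by
  cases hm : PySem.List.max? l (fun x => x) with
  | none =>
    have hl : l = [] := (PySem.List.max?_eq_none_iff _ _).mp hm
    have hl' : l' = [] := by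
      cases hc : l' with
      | nil => rfl
      | cons x t => exact absurd ((hmem x).mpr (by rw [hc]; exact List.mem_cons_self)) (by rw [hl]; simp)
    rw [hl']
    rfl
  | some m =>
    cases hm' : PySem.List.max? l' (fun x => x) with
    | none =>
      have hl' : l' = [] := (PySem.List.max?_eq_none_iff _ _).mp hm'
      exact absurd ((hmem m).mp (PySem.List.max?_mem hm)) (by rw [hl']; simp)
    | some m' =>
      have h1 : m' ≤ m := PySem.List.max?_isMax hm m' ((hmem m').mpr (PySem.List.max?_mem hm'))
      have h2 : m ≤ m' := PySem.List.max?_isMax hm' m ((hmem m).mp (PySem.List.max?_mem hm))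
      simp; omega

theorem pv_val_congr (l l' : List Int) (h1 : l.Nodup) (h2 : l'.Nodup)
    (hmem : ∀ a, a ∈ l ↔ a ∈ l') : pvVal l = pvVal l' := by
  have hperm : l.Perm l' := (List.perm_ext_iff_of_nodup h1 h2).mpr hmem
  unfold pvVal
  rw [hperm.length_eq, pv_minD_congr l l' hmem, pv_maxD_congr l l' hmem]

theorem pv_mem_mapSnd_filter (l : List (Int × Int)) (c a : Int) :
    a ∈ (l.filter (fun q => q.1 == c)).map (fun q => q.2) ↔ (c, a) ∈ l := by
  constructor
  · intro hmem
    obtain ⟨q, hq, hqa⟩ := List.mem_map.mp hmem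
    obtain ⟨hql, hqc⟩ := List.mem_filter.mp hq
    have : q = (c, a) := by
      rcases q with ⟨q1, q2⟩
      simp at hqc hqa
      simp [hqc, hqa]
    rwa [this] at hql
  · intro hmem
    exact List.mem_map.mpr ⟨(c, a), List.mem_filter.mpr ⟨hmem, by simp⟩, rfl⟩

-- ===== VERDICT (by name: the statement is the Claim_ definition above) =====
theorem calculate_schedule_dead_hours_spec : Claim_equal_calculate_schedule_dead_hours := by
  intro ss gs sgs _hdom _hpre
  unfold Spec_calculate_schedule_dead_hours
  unfold calculate_schedule_dead_hours calculate_schedule_dead_hours_alt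
  simp only [pv_occ_eq gs sgs ss]
  rw [pv_scan]
  rw [pv_addSlots_eq gs "group" ss PySem.Dict.empty, pv_addSlots_eq sgs "subgroup" ss _]
  rw [← List.foldl_append]
  rw [pv_A_char]
  set LA : List (Int × Int) :=
    ((ss.flatMap (fun p => (pvEv gs "group" p).map (fun q => (q, p.1)))) ++
     (ss.flatMap (fun p => (pvEv sgs "subgroup" p).map (fun q => (q, p.1))))).map (fun e => e.1) with hLA
  set LB : List (Int × Int) := ss.flatMap (fun p => pvEv gs "group" p ++ pvEv sgs "subgroup" p) with hLB
  set T := PySem.List.sorted2 (PySem.Set.ofList LB) (fun q => q.1) (fun q => q.2) with hT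
  have hmemAB : ∀ q : Int × Int, q ∈ LA ↔ q ∈ LB := by
    intro q
    rw [hLA, hLB]
    simp only [List.mem_map, List.mem_append, List.mem_flatMap]
    constructor
    · rintro ⟨e, (⟨p, hp, x, hx, rfl⟩ | ⟨p, hp, x, hx, rfl⟩), rfl⟩
      · exact ⟨p, hp, Or.inl hx⟩
      · exact ⟨p, hp, Or.inr hx⟩
    · rintro ⟨p, hp, h0 | h0⟩
      · exact ⟨(q, p.1), Or.inl ⟨p, hp, q, h0, rfl⟩, rfl⟩
      · exact ⟨(q, p.1), Or.inr ⟨p, hp, q, h0, rfl⟩, rfl⟩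
  have hTperm : T.Perm (PySem.Set.ofList LB) := PySem.List.sorted2_perm _ _ _ false
  have hTnd : T.Nodup := hTperm.nodup_iff.mpr (PySem.Set.nodup_ofList _)
  have hTpw : T.Pairwise pvLexLt := pv_T_pairwise _ (PySem.Set.nodup_ofList _)
  have hmemT : ∀ q : Int × Int, q ∈ T ↔ q ∈ LA := by
    intro q
    rw [hTperm.mem_iff, PySem.Set.mem_ofList]
    exact (hmemAB q).symm
  rw [pv_aux T hTpw]
  -- the per-day hour lists agree as finite sets, day by day
  have hterm : ∀ c : Int,
      pvVal (((PySem.Set.ofList LA).filter (fun q => q.1 == c)).map (fun q => q.2)) =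
      pvVal (pvHours c T) := by
    intro c
    have hndA : (((PySem.Set.ofList LA).filter (fun q => q.1 == c)).map (fun q => q.2)).Nodup := by
      rw [pv_filter_ofList, pv_mapSnd_ofList c _ (fun y hy => eq_of_beq (List.mem_filter.mp hy).2)]
      exact PySem.Set.nodup_ofList _
    have hndT : (pvHours c T).Nodup := by
      unfold pvHours
      refine List.Nodup.map_on ?_ (hTnd.filter _)
      intro x hx y hy hxy
      have hx1 : x.1 = c := by simpa using (List.mem_filter.mp hx).2
      have hy1 : y.1 = c := by simpa using (List.mem_filter.mp hy).2
      exact Prod.ext (hx1.trans hy1.symm) hxy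
    refine pv_val_congr _ _ hndA hndT ?_
    intro a
    rw [pv_mem_mapSnd_filter, PySem.Set.mem_ofList]
    unfold pvHours
    rw [pv_mem_mapSnd_filter, hmemT]
  rw [List.map_congr_left (fun c _ => hterm c)]
  -- the two day index lists enumerate the same days
  have hdperm : (PySem.Set.ofList (LA.map (fun q => q.1))).Perm (pvDays T) := by
    refine (List.perm_ext_iff_of_nodup (PySem.Set.nodup_ofList _) (pv_days_nodup T hTpw)).mpr ?_
    intro d
    rw [PySem.Set.mem_ofList, pv_mem_days]
    constructor
    · intro hmem
      obtain ⟨q, hq, hqd⟩ := List.mem_map.mp hmem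
      exact ⟨q, (hmemT q).mpr hq, hqd⟩
    · rintro ⟨q, hq, hqd⟩
      exact List.mem_map.mpr ⟨q, (hmemT q).mp hq, hqd⟩
  exact (hdperm.map _).sum_eq
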